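-- pv_equiv track=rewrite | github.com/goncarpani/cvago | backend/cv_generator.py | _group_experiences
-- ===== SOURCE A (Python) =====
-- from collections import OrderedDict
--
-- def _extract_year(date_str: str) -> str:
--     """Extract just the year from a date string like '2023-06' or 'present'."""
--     if not date_str:
--         return ""
--     v = date_str.strip().lower()
--     if v == "present":
--         return "Present"
--     if len(v) >= 4:
--         return v[:4]
--     return date_str
--
-- def _group_experiences(experiences: list) -> list:
--     """Group flat experience entries by company, preserving order.
--     Returns list of (company, year_range, roles) tuples."""
--     groups = OrderedDict()
--     for exp in experiences:
--         company = exp.get("company", "Unknown")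
--         if company not in groups:
--             groups[company] = []
--         groups[company].append(exp)
--
--     result = []
--     for company, roles in groups.items():
--         starts = [r.get("start", "") for r in roles if r.get("start")]
--         ends = [r.get("end", "") for r in roles if r.get("end")]
--         start_year = _extract_year(min(starts)) if starts else ""
--         end_raw = max(ends, key=lambda x: "9999" if x.strip().lower() == "present" else x) if ends else ""
--         end_year = "Present" if end_raw.strip().lower() == "present" else _extract_year(end_raw)
--         year_range = f"{start_year} - {end_year}" if start_year and end_year else ""
--         result.append((company, year_range, roles))
--     return result
-- ===== SOURCE B (Python) =====
-- from collections import OrderedDict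
--
-- def _extract_year(date_str: str) -> str:
--     if not date_str:
--         return ""
--     v = date_str.strip().lower()
--     if v == "present":
--         return "Present"
--     if len(v) >= 4:
--         return v[:4]
--     return date_str
--
-- def _end_key(x: str) -> str:
--     return "9999" if x.strip().lower() == "present" else x
--
-- def _group_experiences(experiences: list) -> list:
--     # One pass: per company keep (roles, running min start, running max end).
--     groups = OrderedDict()
--     for exp in experiences:
--         company = exp.get("company", "Unknown")
--         roles, mn, mx = groups.get(company, ([], None, None))
--         roles = roles + [exp]
--         s = exp.get("start", "")
--         if s and (mn is None or s < mn):
--             mn = s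
--         e = exp.get("end", "")
--         if e and (mx is None or _end_key(mx) < _end_key(e)):
--             mx = e
--         groups[company] = (roles, mn, mx)
--     result = []
--     for company, (roles, mn, mx) in groups.items():
--         start_year = _extract_year(mn) if mn is not None else ""
--         if mx is None:
--             end_year = ""
--         elif mx.strip().lower() == "present":
--             end_year = "Present"
--         else:
--             end_year = _extract_year(mx)
--         year_range = f"{start_year} - {end_year}" if start_year and end_year else ""
--         result.append((company, year_range, roles))
--     return result
-- ===== Notes on version B (the rewrite author's own statement) =====
-- stated objective: alternative
-- what changed: B replaces A's two-phase group-then-rescan (collect all starts/ends per company, then call min/max) by a single pass that maintains, per company, the roles list together with a running minimum start and a running '9999'-keyed maximum end, formatting each maintained extremum afterwards.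
import Mathlib
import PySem

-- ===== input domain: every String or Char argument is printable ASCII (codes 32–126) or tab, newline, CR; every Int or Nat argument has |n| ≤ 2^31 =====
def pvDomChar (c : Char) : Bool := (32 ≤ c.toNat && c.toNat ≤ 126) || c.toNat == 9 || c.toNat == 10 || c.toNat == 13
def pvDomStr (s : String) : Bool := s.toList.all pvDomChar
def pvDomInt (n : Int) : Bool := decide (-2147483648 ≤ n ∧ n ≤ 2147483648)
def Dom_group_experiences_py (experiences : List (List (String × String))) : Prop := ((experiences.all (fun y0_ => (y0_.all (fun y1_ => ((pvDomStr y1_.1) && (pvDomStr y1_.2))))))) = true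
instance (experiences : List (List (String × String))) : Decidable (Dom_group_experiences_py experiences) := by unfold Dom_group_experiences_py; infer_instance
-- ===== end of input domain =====

-- B groups in ONE pass, maintaining per company (roles, running min start, running max end)
-- instead of A's group-then-rescan with list comprehensions and min/max calls (objective: alternative).

-- ===== PORT A =====

-- exp.get(k, dflt) on the association-list encoding of a Python dict (first match)
def pyGetS (d : List (String × String)) (k dflt : String) : String :=
  (PySem.Dict.mk d).getD k dflt

def extractYear (date_str : String) : String :=
  if date_str = "" then ""
  else
    let v := PySem.Str.lower (PySem.Str.strip date_str)
    if v = "present" then "Present"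
    else if 4 ≤ PySem.Str.len v then PySem.Str.slice v none (some 4)
    else date_str

-- the key lambda of A's max(ends, key=…)
def endKey (x : String) : String :=
  if PySem.Str.lower (PySem.Str.strip x) = "present" then "9999" else x

def group_experiences_py (experiences : List (List (String × String))) : List (String × String × (List (List (String × String)))) :=
  let groups : PySem.Dict String (List (List (String × String))) :=
    experiences.foldl (fun d exp =>
      let company := pyGetS exp "company" "Unknown"
      let d := if d.contains company then d else d.insert company []
      d.modify company [] (fun l => l ++ [exp])) PySem.Dict.empty
  groups.items.map (fun cr =>
    let company := cr.1
    let roles := cr.2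
    let starts := (roles.filter (fun r => pyGetS r "start" "" ≠ "")).map (fun r => pyGetS r "start" "")
    let ends := (roles.filter (fun r => pyGetS r "end" "" ≠ "")).map (fun r => pyGetS r "end" "")
    let start_year := match PySem.List.min? starts (fun x => x) with
      | some m => extractYear m
      | none => ""
    let end_raw := match PySem.List.max? ends endKey with
      | some m => m
      | none => ""
    let end_year := if PySem.Str.lower (PySem.Str.strip end_raw) = "present" then "Present" else extractYear end_raw
    let year_range := if start_year ≠ "" ∧ end_year ≠ "" then start_year ++ " - " ++ end_year else ""
    (company, year_range, roles))

-- ===== PORT B =====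

def altStep (d : PySem.Dict String (List (List (String × String)) × Option String × Option String))
    (exp : List (String × String)) :
    PySem.Dict String (List (List (String × String)) × Option String × Option String) :=
  let company := pyGetS exp "company" "Unknown"
  let s := pyGetS exp "start" ""
  let e := pyGetS exp "end" ""
  d.modify company ([], none, none) (fun t =>
    (t.1 ++ [exp],
     (if s ≠ "" then
        match t.2.1 with
        | none => some s
        | some m => if s < m then some s else some m
      else t.2.1),
     (if e ≠ "" then
        match t.2.2 with
        | none => some e
        | some m => if endKey m < endKey e then some e else some m
      else t.2.2)))

def group_experiences_py_alt (experiences : List (List (String × String))) : List (String × String × (List (List (String × String)))) :=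
  let groups := experiences.foldl altStep PySem.Dict.empty
  groups.items.map (fun ct =>
    let start_year := match ct.2.2.1 with
      | none => ""
      | some m => extractYear m
    let end_year := match ct.2.2.2 with
      | none => ""
      | some m => if PySem.Str.lower (PySem.Str.strip m) = "present" then "Present" else extractYear m
    let year_range := if start_year ≠ "" ∧ end_year ≠ "" then start_year ++ " - " ++ end_year else ""
    (ct.1, year_range, ct.2.1))

-- ===== PRECONDITION & SPEC =====
def Spec_group_experiences_py (experiences : List (List (String × String))) (out : List (String × String × (List (List (String × String))))) : Prop := out = group_experiences_py_alt experiences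
instance (experiences : List (List (String × String))) (out : List (String × String × (List (List (String × String))))) : Decidable (Spec_group_experiences_py experiences out) := by unfold Spec_group_experiences_py; infer_instance

-- ===== CLAIM (what is proved, stated in full; the proofs are below) =====
def Claim_equal_group_experiences_py : Prop := ∀ (experiences : List (List (String × String))), Dom_group_experiences_py experiences → Spec_group_experiences_py experiences (group_experiences_py experiences)

-- ===== LEMMAS AND PROOFS =====

-- the grouping key of an experience entry
def expKey (e : List (String × String)) : String := pyGetS e "company" "Unknown"

-- B's running-minimum update for the "start" field
def stepMin (mn : Option String) (r : List (String × String)) : Option String :=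
  let s := pyGetS r "start" ""
  if s ≠ "" then
    match mn with
    | none => some s
    | some m => if s < m then some s else some m
  else mn

-- B's running-maximum update for the "end" field (key: 'present' ↦ "9999")
def stepMax (mx : Option String) (r : List (String × String)) : Option String :=
  let e := pyGetS r "end" ""
  if e ≠ "" then
    match mx with
    | none => some e
    | some m => if endKey m < endKey e then some e else some m
  else mx

-- B's per-entry value update
def gB (exp : List (String × String))
    (t : List (List (String × String)) × Option String × Option String) :
    List (List (String × String)) × Option String × Option String :=
  (t.1 ++ [exp], stepMin t.2.1 exp, stepMax t.2.2 exp)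

-- A's per-company formatting (the body of A's result map)
def FA (cr : String × List (List (String × String))) : String × String × List (List (String × String)) :=
  let company := cr.1
  let roles := cr.2
  let starts := (roles.filter (fun r => pyGetS r "start" "" ≠ "")).map (fun r => pyGetS r "start" "")
  let ends := (roles.filter (fun r => pyGetS r "end" "" ≠ "")).map (fun r => pyGetS r "end" "")
  let start_year := match PySem.List.min? starts (fun x => x) with
    | some m => extractYear m
    | none => ""
  let end_raw := match PySem.List.max? ends endKey with
    | some m => m
    | none => ""
  let end_year := if PySem.Str.lower (PySem.Str.strip end_raw) = "present" then "Present" else extractYear end_raw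
  let year_range := if start_year ≠ "" ∧ end_year ≠ "" then start_year ++ " - " ++ end_year else ""
  (company, year_range, roles)

-- B's per-company formatting (the body of B's result map)
def FB (ct : String × List (List (String × String)) × Option String × Option String) :
    String × String × List (List (String × String)) :=
  let start_year := match ct.2.2.1 with
    | none => ""
    | some m => extractYear m
  let end_year := match ct.2.2.2 with
    | none => ""
    | some m => if PySem.Str.lower (PySem.Str.strip m) = "present" then "Present" else extractYear m
  let year_range := if start_year ≠ "" ∧ end_year ≠ "" then start_year ++ " - " ++ end_year else ""
  (ct.1, year_range, ct.2.1)

-- conditional insert followed by the append IS a plain modify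
theorem stepA_modify {ν : Type} (d : PySem.Dict String ν) (c : String) (d0 : ν) (f : ν → ν) :
    PySem.Dict.modify (if d.contains c then d else d.insert c d0) c d0 f = d.modify c d0 f := by
  by_cases h : d.contains c = true
  · simp [h]
  · simp only [h, Bool.false_eq_true, ite_false]
    show (d.insert c d0).insert c (f ((d.insert c d0).getD c d0)) = d.insert c (f (d.getD c d0))
    rw [PySem.Dict.getD_insert_self, PySem.Dict.insert_insert_self,
      PySem.Dict.getD_of_not_contains d d0 (by simpa using h)]

-- A's grouping loop in modify form
theorem foldA_eq (l : List (List (String × String)))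
    (d : PySem.Dict String (List (List (String × String)))) :
    l.foldl (fun d exp =>
        PySem.Dict.modify (if d.contains (expKey exp) then d else d.insert (expKey exp) [])
          (expKey exp) [] (fun rs => rs ++ [exp])) d
      = l.foldl (fun d exp => d.modify (expKey exp) [] (fun rs => rs ++ [exp])) d := by
  induction l generalizing d with
  | nil => rfl
  | cons x t ih => simp only [List.foldl_cons, stepA_modify]

-- getD after a modify-style grouping loop = fold of the updates over the matching entries
theorem getD_modify_fold {ν : Type} (l : List (List (String × String))) (d0 : ν)
    (g : List (String × String) → ν → ν) (d : PySem.Dict String ν) (c : String) :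
    (l.foldl (fun d e => d.modify (expKey e) d0 (g e)) d).getD c d0
      = (l.filter (fun e => expKey e == c)).foldl (fun acc e => g e acc) (d.getD c d0) := by
  induction l generalizing d with
  | nil => rfl
  | cons x t ih =>
    simp only [List.foldl_cons, List.filter_cons]
    by_cases h : expKey x = c
    · subst h
      rw [ih, PySem.Dict.getD_modify, if_pos rfl]
      simp
    · have hne : ¬ (c = expKey x) := fun hc => h hc.symm
      rw [ih, PySem.Dict.getD_modify, if_neg hne, if_neg (by simp [h] : ¬ ((expKey x == c) = true))]

theorem foldl_app {α : Type} (l : List α) (init : List α) :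
    l.foldl (fun acc x => acc ++ [x]) init = init ++ l := by
  induction l generalizing init with
  | nil => simp
  | cons x t ih => simp [ih]

-- the one-pass triple fold splits componentwise
theorem foldB_triple (rs : List (List (String × String)))
    (acc : List (List (String × String))) (mn mx : Option String) :
    rs.foldl (fun t e => gB e t) (acc, mn, mx)
      = (acc ++ rs, rs.foldl stepMin mn, rs.foldl stepMax mx) := by
  induction rs generalizing acc mn mx with
  | nil => simp
  | cons x t ih =>
    rw [List.foldl_cons, List.foldl_cons, List.foldl_cons]
    rw [show gB x (acc, mn, mx) = (acc ++ [x], stepMin mn x, stepMax mx x) from rfl]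
    rw [ih]
    simp

-- if with strict < is Lean's min / the key-maximum combine step
theorem ite_min (m s : String) : (if s < m then s else m) = min m s := by
  rcases lt_or_ge s m with h | h
  · rw [if_pos h, min_eq_right h.le]
  · rw [if_neg (not_lt.mpr h), min_eq_left h]

-- running minimum from a seed = seed folded with min over the collected starts
theorem stepMin_some (rs : List (List (String × String))) (v : String) :
    rs.foldl stepMin (some v)
      = some (((rs.filter (fun r => pyGetS r "start" "" ≠ "")).map (fun r => pyGetS r "start" "")).foldl min v) := by
  induction rs generalizing v with
  | nil => rfl
  | cons r t ih =>
    rw [List.foldl_cons]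
    by_cases h : pyGetS r "start" "" ≠ ""
    · have hstep : stepMin (some v) r = some (min v (pyGetS r "start" "")) := by
        simp only [stepMin, if_pos h]
        rw [← apply_ite some, ite_min]
      rw [hstep, ih, List.filter_cons_of_pos (by simpa using h), List.map_cons, List.foldl_cons]
    · have hstep : stepMin (some v) r = some v := by simp only [stepMin, if_neg h]
      rw [hstep, ih, List.filter_cons_of_neg (by simpa using h)]

-- the running minimum = min? of the comprehension A builds
theorem minB (rs : List (List (String × String))) :
    rs.foldl stepMin none
      = PySem.List.min? ((rs.filter (fun r => pyGetS r "start" "" ≠ "")).map (fun r => pyGetS r "start" "")) (fun x => x) := by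
  induction rs with
  | nil => rfl
  | cons r t ih =>
    rw [List.foldl_cons]
    by_cases h : pyGetS r "start" "" ≠ ""
    · have hstep : stepMin none r = some (pyGetS r "start" "") := by simp only [stepMin, if_pos h]
      rw [hstep, stepMin_some, List.filter_cons_of_pos (by simpa using h), List.map_cons,
        PySem.List.min?_id_cons]
    · have hstep : stepMin none r = none := by simp only [stepMin, if_neg h]
      rw [hstep, ih, List.filter_cons_of_neg (by simpa using h)]

-- max? with the endKey key, spelled as a fold of its combine step
theorem max?_endKey_cons (x : String) (t : List String) :
    PySem.List.max? (x :: t) endKey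
      = some (t.foldl (fun m y => if endKey m < endKey y then y else m) x) := by
  induction t generalizing x with
  | nil => rfl
  | cons y t ih =>
    have h1 : PySem.List.max? (x :: y :: t) endKey
        = PySem.List.max? ((if endKey x < endKey y then y else x) :: t) endKey := by
      simp only [PySem.List.max?, List.foldl_cons]
      rw [apply_ite some]
    rw [h1, ih, List.foldl_cons]

theorem stepMax_some (rs : List (List (String × String))) (v : String) :
    rs.foldl stepMax (some v)
      = some (((rs.filter (fun r => pyGetS r "end" "" ≠ "")).map (fun r => pyGetS r "end" "")).foldl
          (fun m y => if endKey m < endKey y then y else m) v) := by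
  induction rs generalizing v with
  | nil => rfl
  | cons r t ih =>
    rw [List.foldl_cons]
    by_cases h : pyGetS r "end" "" ≠ ""
    · have hstep : stepMax (some v) r
          = some (if endKey v < endKey (pyGetS r "end" "") then pyGetS r "end" "" else v) := by
        simp only [stepMax, if_pos h]
        rw [← apply_ite some]
      rw [hstep, ih, List.filter_cons_of_pos (by simpa using h), List.map_cons, List.foldl_cons]
    · have hstep : stepMax (some v) r = some v := by simp only [stepMax, if_neg h]
      rw [hstep, ih, List.filter_cons_of_neg (by simpa using h)]

-- the running maximum = max? (key endKey) of the comprehension A builds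
theorem maxB (rs : List (List (String × String))) :
    rs.foldl stepMax none
      = PySem.List.max? ((rs.filter (fun r => pyGetS r "end" "" ≠ "")).map (fun r => pyGetS r "end" "")) endKey := by
  induction rs with
  | nil => rfl
  | cons r t ih =>
    rw [List.foldl_cons]
    by_cases h : pyGetS r "end" "" ≠ ""
    · have hstep : stepMax none r = some (pyGetS r "end" "") := by simp only [stepMax, if_pos h]
      rw [hstep, stepMax_some, List.filter_cons_of_pos (by simpa using h), List.map_cons,
        max?_endKey_cons]
    · have hstep : stepMax none r = none := by simp only [stepMax, if_neg h]
      rw [hstep, ih, List.filter_cons_of_neg (by simpa using h)]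

-- formatting the maintained extrema = formatting A's min/max over the collected lists
theorem format_eq (c : String) (rs : List (List (String × String))) :
    FA (c, rs) = FB (c, rs, rs.foldl stepMin none, rs.foldl stepMax none) := by
  simp only [FA, FB]
  rw [minB rs, maxB rs]
  cases PySem.List.min? ((rs.filter (fun r => pyGetS r "start" "" ≠ "")).map (fun r => pyGetS r "start" "")) (fun x => x) <;>
    cases PySem.List.max? ((rs.filter (fun r => pyGetS r "end" "" ≠ "")).map (fun r => pyGetS r "end" "")) endKey <;>
    (simp [extractYear]; all_goals (intros; decide))

theorem ports_agree (experiences : List (List (String × String))) :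
    group_experiences_py experiences = group_experiences_py_alt experiences := by
  have hA : group_experiences_py experiences
      = (experiences.foldl (fun d exp => d.modify (expKey exp) [] (fun rs => rs ++ [exp]))
          PySem.Dict.empty).items.map FA :=
    congrArg (fun d => d.items.map FA) (foldA_eq experiences PySem.Dict.empty)
  have hB : group_experiences_py_alt experiences
      = (experiences.foldl (fun d exp => d.modify (expKey exp) ([], none, none) (gB exp))
          PySem.Dict.empty).items.map FB := rfl
  rw [hA, hB]
  have hnA := PySem.Dict.nodup_keys_foldl_modify_key experiences expKey []
    (fun _ e rs => rs ++ [e]) PySem.Dict.empty PySem.Dict.nodup_keys_empty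
  have hnB := PySem.Dict.nodup_keys_foldl_modify_key experiences expKey (([], none, none) : List (List (String × String)) × Option String × Option String)
    (fun _ e => gB e) PySem.Dict.empty PySem.Dict.nodup_keys_empty
  rw [PySem.Dict.items_eq_map_keys _ hnA [], PySem.Dict.items_eq_map_keys _ hnB ([], none, none)]
  rw [PySem.Dict.keys_foldl_modify_key experiences expKey [] (fun _ e rs => rs ++ [e]) PySem.Dict.empty,
    PySem.Dict.keys_foldl_modify_key experiences expKey (([], none, none) : List (List (String × String)) × Option String × Option String)
      (fun _ e => gB e) PySem.Dict.empty]
  rw [List.map_map, List.map_map]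
  apply List.map_congr_left
  intro c _
  show FA (c, _) = FB (c, _)
  rw [getD_modify_fold, getD_modify_fold, PySem.Dict.getD_empty, PySem.Dict.getD_empty,
    foldl_app, foldB_triple]
  simp only [List.nil_append]
  exact format_eq c _

-- ===== VERDICT (by name: the statement is the Claim_ definition above) =====
theorem group_experiences_py_spec : Claim_equal_group_experiences_py := by
  intro experiences _
  unfold Spec_group_experiences_py
  exact ports_agree experiences
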